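-- pv_equiv track=rewrite | github.com/DisenchantmentDev/Python_Algorithms | StringPermutations/solution.py | countPermStr
-- ===== SOURCE A (Python) =====
-- from collections import Counter
--
-- def countPermStr(string1, string2):
--     # check if either string is none
--     if not string1 or not string2:
--         raise ValueError
--     #check if string 2 is longer than string 1
--     if len(string2) > len(string1):
--         raise ValueError
--
--     out = 0
--     p_counter = Counter(string2)
--     m = len(string2)
--     n = len(string1)
--     check_counter = Counter(string1[:m])
--
--     if p_counter == check_counter:
--         out += 1
--
--     for i in range(m, n):
--         check_counter[string1[i]] += 1
--         check_counter[string1[i-m]] -= 1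
--         if check_counter[string1[i-m]] == 0:
--             del check_counter[string1[i-m]]
--
--         if check_counter == p_counter:
--             out += 1
--
--     return out
-- ===== SOURCE B (Python) =====
-- def countPermStr(string1, string2):
--     if not string1 or not string2:
--         raise ValueError
--     m = len(string2)
--     n = len(string1)
--     if m > n:
--         raise ValueError
--     target = sorted(string2)
--     return sum(1 for i in range(n - m + 1) if sorted(string1[i:i + m]) == target)
-- ===== Notes on version B (the rewrite author's own statement) =====
-- stated objective: alternative
-- what changed: B drops the sliding Counter with incremental add/remove/delete-and-compare entirely and instead precomputes sorted(string2) once and counts the windows whose sorted characters equal it — a stateless per-window recomputation instead of A's stateful dictionary maintenance.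
import Mathlib
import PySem

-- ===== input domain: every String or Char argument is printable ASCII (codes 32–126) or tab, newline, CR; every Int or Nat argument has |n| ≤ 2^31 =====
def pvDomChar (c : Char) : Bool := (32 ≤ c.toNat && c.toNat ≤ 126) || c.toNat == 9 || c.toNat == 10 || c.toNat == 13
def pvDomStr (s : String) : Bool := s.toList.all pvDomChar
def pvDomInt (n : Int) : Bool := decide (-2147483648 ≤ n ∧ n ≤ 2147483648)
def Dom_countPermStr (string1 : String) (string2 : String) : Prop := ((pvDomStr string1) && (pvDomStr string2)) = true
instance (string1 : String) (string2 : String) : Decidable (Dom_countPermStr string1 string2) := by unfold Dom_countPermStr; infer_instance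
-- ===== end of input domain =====

-- B replaces A's sliding Counter with per-window sorting: it compares sorted(window) with
-- sorted(string2) for every window — a different algorithm of similar cost (objective: alternative).


-- ===== PORT A =====
-- Python's `check_counter == p_counter` (dict/Counter equality, insertion order ignored):
-- same key set and the same value at every key.
def pyDictEq (d e : PySem.Dict Char Int) : Bool :=
  PySem.Set.equal d.keys e.keys && d.keys.all (fun k => d.getD k 0 == e.getD k 0)

-- loop body of A's `for i in range(m, n)`
def stepA (cs : List Char) (m : Int) (pc : PySem.Dict Char Int)
    (st : PySem.Dict Char Int × Int) (i : Int) : PySem.Dict Char Int × Int :=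
  let d := st.1.modify (PySem.List.pyGetD cs i ' ') 0 (· + 1)      -- check_counter[string1[i]] += 1
  let d := d.modify (PySem.List.pyGetD cs (i - m) ' ') 0 (· - 1)   -- check_counter[string1[i-m]] -= 1
  let d := if d.getD (PySem.List.pyGetD cs (i - m) ' ') 0 == 0     -- if … == 0: del …
           then d.erase (PySem.List.pyGetD cs (i - m) ' ') else d
  (d, if pyDictEq d pc then st.2 + 1 else st.2)                    -- if check_counter == p_counter: out += 1

def countPermStr (string1 : String) (string2 : String) : Int :=
  let cs := string1.toList
  let ps := string2.toList
  if cs = [] ∨ ps = [] then 0                                      -- raise ValueError (outside Pre_)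
  else if ps.length > cs.length then 0                             -- raise ValueError (outside Pre_)
  else
    let p_counter := PySem.Dict.counter ps
    let m : Int := ps.length
    let n : Int := cs.length
    let check := PySem.Dict.counter (PySem.List.slice cs none (some m))  -- Counter(string1[:m])
    let out : Int := if pyDictEq p_counter check then 1 else 0
    ((PySem.List.pyRange m n 1).foldl (stepA cs m p_counter) (check, out)).2

-- ===== PORT B =====
-- `sorted(string1[i:i+m]) == target`
def winSortedEq (cs : List Char) (m : Int) (target : List Char) (i : Int) : Bool :=
  PySem.List.sorted (PySem.List.slice cs (some i) (some (i + m))) (fun x => x) false == target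

def countPermStr_alt (string1 : String) (string2 : String) : Int :=
  let cs := string1.toList
  let ps := string2.toList
  if cs = [] ∨ ps = [] then 0                                      -- raise ValueError (outside Pre_)
  else
    let m : Int := ps.length
    let n : Int := cs.length
    if m > n then 0                                                -- raise ValueError (outside Pre_)
    else
      let target := PySem.List.sorted ps (fun x => x) false
      -- sum(1 for i in range(n - m + 1) if sorted(string1[i:i+m]) == target)
      ((PySem.List.pyRange 0 (n - m + 1) 1).countP (winSortedEq cs m target) : Int)

-- ===== PRECONDITION & SPEC =====
-- Pre_ excludes exactly the inputs on which A raises ValueError: an empty string1 or string2,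
-- or string2 longer than string1.
def Pre_countPermStr (string1 : String) (string2 : String) : Prop :=
  string1.toList ≠ [] ∧ string2.toList ≠ [] ∧ string2.toList.length ≤ string1.toList.length
instance (string1 : String) (string2 : String) : Decidable (Pre_countPermStr string1 string2) := by
  unfold Pre_countPermStr; infer_instance

def pvWitness_countPermStr : String × String := ("cbabcacab", "abc")

def Spec_countPermStr (string1 : String) (string2 : String) (out : Int) : Prop := out = countPermStr_alt string1 string2
instance (string1 : String) (string2 : String) (out : Int) : Decidable (Spec_countPermStr string1 string2 out) := by unfold Spec_countPermStr; infer_instance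

-- ===== CLAIM (what is proved, stated in full; the proofs are below) =====
def Claim_equal_countPermStr : Prop := ∀ (string1 : String) (string2 : String), Dom_countPermStr string1 string2 → Pre_countPermStr string1 string2 → Spec_countPermStr string1 string2 (countPermStr string1 string2)

-- ===== LEMMAS AND PROOFS =====

-- A's check_counter is, at every test, exactly the multiset of the current window:
-- unique keys, key set = the window's characters, value = the character's count in the window.
def CInv (d : PySem.Dict Char Int) (w : List Char) : Prop :=
  d.keys.Nodup ∧ (∀ x, x ∈ d.keys ↔ x ∈ w) ∧ (∀ x, d.getD x 0 = (w.count x : Int))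

-- the dict produced by one iteration of A's loop (proof-side name for the loop body's updates)
def updD (d : PySem.Dict Char Int) (hch c : Char) : PySem.Dict Char Int :=
  let d1 := d.modify c 0 (· + 1)
  let d2 := d1.modify hch 0 (· - 1)
  if d2.getD hch 0 == 0 then d2.erase hch else d2

lemma cinv_counter (w : List Char) : CInv (PySem.Dict.counter w) w := by
  refine ⟨PySem.Dict.nodup_keys_counter w, ?_, ?_⟩
  · intro x
    rw [PySem.Dict.keys_counter]
    exact PySem.Set.mem_ofList w x
  · intro x
    exact PySem.Dict.getD_counter w x

lemma pyDictEq_true_iff (d e : PySem.Dict Char Int) (w v : List Char)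
    (hd : CInv d w) (he : CInv e v) :
    pyDictEq d e = true ↔ ∀ x, w.count x = v.count x := by
  obtain ⟨_, hdm, hdc⟩ := hd
  obtain ⟨_, hem, hec⟩ := he
  unfold pyDictEq
  rw [Bool.and_eq_true, PySem.Set.equal_iff, List.all_eq_true]
  constructor
  · rintro ⟨hkeys, hvals⟩ x
    by_cases hx : x ∈ w
    · have := hvals x ((hdm x).mpr hx)
      rw [beq_iff_eq, hdc, hec] at this
      exact_mod_cast this
    · have hxv : x ∉ v := fun hv => hx ((hdm x).mp ((hkeys x).mpr ((hem x).mpr hv)))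
      rw [List.count_eq_zero_of_not_mem hx, List.count_eq_zero_of_not_mem hxv]
  · intro hcnt
    constructor
    · intro x
      rw [hdm, hem, ← List.count_pos_iff, ← List.count_pos_iff, hcnt]
    · intro k _
      rw [beq_iff_eq, hdc, hec, hcnt]


-- ---- Dict.erase facts (erase filters the items list) ----

lemma find?_filter_ne (l : List (Char × Int)) (k k' : Char) (h : k' ≠ k) :
    (l.filter (fun p => !(p.1 == k))).find? (fun p => p.1 == k') =
      l.find? (fun p => p.1 == k') := by
  induction l with
  | nil => rfl
  | cons p t ih =>
    by_cases hp : p.1 = k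
    · rw [List.filter_cons_of_neg (by simp [hp]),
        List.find?_cons_of_neg (by simp [hp]; exact fun e => h e.symm), ih]
    · rw [List.filter_cons_of_pos (by simp [hp])]
      by_cases hp' : p.1 = k'
      · rw [List.find?_cons_of_pos (by simp [hp']), List.find?_cons_of_pos (by simp [hp'])]
      · rw [List.find?_cons_of_neg (by simp [hp']), List.find?_cons_of_neg (by simp [hp']), ih]

lemma get?_erase (d : PySem.Dict Char Int) (k k' : Char) :
    (d.erase k).get? k' = if k' = k then none else d.get? k' := by
  by_cases h : k' = k
  · subst h
    have hnone : (d.items.filter (fun p => !(p.1 == k'))).find? (fun p => p.1 == k') = none := by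
      rw [List.find?_eq_none]
      intro p hp
      have := (List.mem_filter.mp hp).2
      simpa using this
    simp [PySem.Dict.erase, PySem.Dict.get?, hnone]
  · simp [PySem.Dict.erase, PySem.Dict.get?, find?_filter_ne d.items k k' h, h]

lemma getD_erase (d : PySem.Dict Char Int) (k k' : Char) :
    (d.erase k).getD k' 0 = if k' = k then 0 else d.getD k' 0 := by
  rw [PySem.Dict.getD_eq_get?_getD, get?_erase]
  split_ifs <;> simp [PySem.Dict.getD_eq_get?_getD]

lemma keys_erase (d : PySem.Dict Char Int) (k : Char) :
    (d.erase k).keys = d.keys.filter (fun x => !(x == k)) := by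
  show (d.items.filter (fun p => !(p.1 == k))).map (fun x => x.1)
      = (d.items.map (fun x => x.1)).filter (fun x => !(x == k))
  induction d.items with
  | nil => rfl
  | cons p t ih => by_cases hp : p.1 = k <;> simp [hp, ih]

lemma mem_keys_erase (d : PySem.Dict Char Int) (k x : Char) :
    x ∈ (d.erase k).keys ↔ x ∈ d.keys ∧ x ≠ k := by
  rw [keys_erase]; simp

lemma nodup_keys_erase (d : PySem.Dict Char Int) (k : Char) (h : d.keys.Nodup) :
    (d.erase k).keys.Nodup := by
  rw [keys_erase]; exact h.filter _

-- ---- the loop body preserves the window invariant ----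

lemma take_cons_getElem (cs : List Char) (j m : Nat) (hj : j < cs.length) (hm : 1 ≤ m) :
    (cs.drop j).take m = cs[j] :: ((cs.drop (j + 1)).take (m - 1)) := by
  obtain ⟨m', rfl⟩ : ∃ m', m = m' + 1 := ⟨m - 1, by omega⟩
  rw [List.drop_eq_getElem_cons hj, List.take_succ_cons]
  simp

lemma take_snoc_getElem (cs : List Char) (j m : Nat) (hjm : j + m ≤ cs.length) (hm : 1 ≤ m) :
    (cs.drop j).take m = ((cs.drop j).take (m - 1)) ++ [cs[j + (m - 1)]'(by omega)] := by
  obtain ⟨m', rfl⟩ : ∃ m', m = m' + 1 := ⟨m - 1, by omega⟩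
  simp only [Nat.add_sub_cancel]
  rw [List.take_add_one, List.getElem?_eq_getElem (by rw [List.length_drop]; omega)]
  simp [List.getElem_drop]

lemma update_inv (d : PySem.Dict Char Int) (h c : Char) (t : List Char)
    (hinv : CInv d (h :: t)) :
    CInv (updD d h c) (t ++ [c]) := by
  obtain ⟨hnd, hmem, hcnt⟩ := hinv
  show CInv (if ((d.modify c 0 (· + 1)).modify h 0 (· - 1)).getD h 0 == 0
             then ((d.modify c 0 (· + 1)).modify h 0 (· - 1)).erase h
             else (d.modify c 0 (· + 1)).modify h 0 (· - 1)) (t ++ [c])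
  set d1 := d.modify c 0 (· + 1) with hd1
  set d2 := d1.modify h 0 (· - 1) with hd2
  have hg2 : ∀ x, d2.getD x 0 = ((t ++ [c]).count x : Int) := by
    intro x
    have e2 : d2.getD x 0 = if x = h then d1.getD h 0 - 1 else d1.getD x 0 :=
      PySem.Dict.getD_modify d1 h x 0 _
    have e1 : d1.getD x 0 = if x = c then d.getD c 0 + 1 else d.getD x 0 :=
      PySem.Dict.getD_modify d c x 0 _
    have e1h : d1.getD h 0 = if h = c then d.getD c 0 + 1 else d.getD h 0 :=
      PySem.Dict.getD_modify d c h 0 _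
    rw [e2, e1, e1h, hcnt, hcnt, hcnt]
    by_cases hxh : x = h <;> by_cases hxc : x = c
    · subst hxc; subst hxh
      simp [List.count_append]
    · subst hxh
      simp [List.count_append, hxc, Ne.symm hxc]
    · subst hxc
      simp [List.count_append, hxh, Ne.symm hxh]
    · simp [List.count_append, hxh, Ne.symm hxh, hxc, Ne.symm hxc]
  have hins : d2 = (d.insert c (d.getD c 0 + 1)).insert h (d1.getD h 0 - 1) := rfl
  have hkm : ∀ x, x ∈ d2.keys ↔ x = h ∨ x = c ∨ x ∈ d.keys := by
    intro x
    rw [hins, PySem.Dict.mem_keys_insert, PySem.Dict.mem_keys_insert]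
  have hknd : d2.keys.Nodup := by
    rw [hins]
    exact PySem.Dict.nodup_keys_insert _ _ _ (PySem.Dict.nodup_keys_insert _ _ _ hnd)
  by_cases h0 : d2.getD h 0 == 0
  · -- the departing character left the window entirely: it is deleted
    have hcount0 : (t ++ [c]).count h = 0 := by
      have := hg2 h
      rw [beq_iff_eq] at h0
      omega
    have hnotin : h ∉ t ++ [c] := List.count_eq_zero.mp hcount0
    rw [if_pos h0]
    refine ⟨nodup_keys_erase _ _ hknd, ?_, ?_⟩
    · intro x
      rw [mem_keys_erase]
      constructor
      · rintro ⟨hk, hne⟩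
        rcases (hkm x).mp hk with rfl | rfl | hkd
        · exact absurd rfl hne
        · exact List.mem_append_right _ (List.mem_singleton.mpr rfl)
        · rcases List.mem_cons.mp ((hmem x).mp hkd) with rfl | hxt
          · exact absurd rfl hne
          · exact List.mem_append_left _ hxt
      · intro hx
        have hne : x ≠ h := fun e => hnotin (e ▸ hx)
        refine ⟨(hkm x).mpr ?_, hne⟩
        rcases List.mem_append.mp hx with hxt | hxc
        · exact Or.inr (Or.inr ((hmem x).mpr (List.mem_cons_of_mem _ hxt)))
        · exact Or.inr (Or.inl (List.mem_singleton.mp hxc))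
    · intro x
      rw [getD_erase]
      split_ifs with hxh
      · subst hxh; rw [hcount0]; simp
      · exact hg2 x
  · -- the departing character still occurs in the new window: entry stays
    have hcpos : 0 < (t ++ [c]).count h := by
      have := hg2 h
      rw [beq_iff_eq] at h0
      have hnn : (0 : Int) ≤ ((t ++ [c]).count h : Int) := by positivity
      omega
    have hhin : h ∈ t ++ [c] := List.count_pos_iff.mp hcpos
    rw [if_neg h0]
    refine ⟨hknd, ?_, hg2⟩
    intro x
    rw [hkm]
    constructor
    · rintro (rfl | rfl | hkd)
      · exact hhin
      · exact List.mem_append_right _ (List.mem_singleton.mpr rfl)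
      · rcases List.mem_cons.mp ((hmem x).mp hkd) with rfl | hxt
        · exact hhin
        · exact List.mem_append_left _ hxt
    · intro hx
      rcases List.mem_append.mp hx with hxt | hxc
      · exact Or.inr (Or.inr ((hmem x).mpr (List.mem_cons_of_mem _ hxt)))
      · exact Or.inr (Or.inl (List.mem_singleton.mp hxc))

-- ---- B's window test, characterised ----

lemma winSortedEq_iff (cs ps : List Char) (j : Nat) :
    winSortedEq cs (ps.length : Int) (PySem.List.sorted ps (fun x => x) false) (j : Int) = true
      ↔ ((cs.drop j).take ps.length).Perm ps := by
  unfold winSortedEq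
  have hcast : ((j : Int) + (ps.length : Int)) = ((j + ps.length : Nat) : Int) := by push_cast; ring
  rw [hcast, PySem.List.slice_natCast cs j (j + ps.length)]
  have : j + ps.length - j = ps.length := by omega
  rw [this, beq_iff_eq, PySem.List.sorted_id_eq_sorted_id_iff_perm]

-- ---- the main loop, window by window ----

lemma loopA (cs ps : List Char) (hm : 1 ≤ ps.length) :
    ∀ (k i : Nat) (d : PySem.Dict Char Int) (o : Int),
      i + k = cs.length → ps.length ≤ i →
      CInv d ((cs.drop (i - ps.length)).take ps.length) →
      ((PySem.List.pyRange (i : Int) (cs.length : Int) 1).foldl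
        (stepA cs (ps.length : Int) (PySem.Dict.counter ps)) (d, o)).2
      = o + ((PySem.List.pyRange ((i : Int) - (ps.length : Int) + 1)
               ((cs.length : Int) - (ps.length : Int) + 1) 1).countP
          (winSortedEq cs (ps.length : Int) (PySem.List.sorted ps (fun x => x) false)) : Int) := by
  intro k
  induction k with
  | zero =>
    intro i d o hik hmi hinv
    have hi : i = cs.length := by omega
    subst hi
    rw [PySem.List.pyRange_one_eq_nil (le_refl _), PySem.List.pyRange_one_eq_nil (le_refl _)]
    simp
  | succ k ih =>
    intro i d o hik hmi hinv
    have hin : (i : Int) < (cs.length : Int) := by exact_mod_cast (by omega : i < cs.length)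
    have hilt : i < cs.length := by omega
    have himlt : i - ps.length < cs.length := by omega
    rw [PySem.List.pyRange_one_cons hin]
    simp only [List.foldl_cons]
    -- the two characters read in this iteration
    have hc : PySem.List.pyGetD cs (i : Int) ' ' = cs[i] :=
      PySem.List.pyGetD_eq_getElem cs ' ' (by positivity) hin
    have hcastim : (i : Int) - (ps.length : Int) = ((i - ps.length : Nat) : Int) := by
      push_cast [Nat.cast_sub hmi]; ring
    have hh : PySem.List.pyGetD cs ((i : Int) - (ps.length : Int)) ' ' = cs[i - ps.length] := by
      rw [hcastim]
      exact PySem.List.pyGetD_eq_getElem cs ' ' (by positivity)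
        (by exact_mod_cast himlt)
    -- window decomposition
    have hwin : (cs.drop (i - ps.length)).take ps.length
        = cs[i - ps.length] :: ((cs.drop (i - ps.length + 1)).take (ps.length - 1)) :=
      take_cons_getElem cs (i - ps.length) ps.length himlt hm
    have hwin' : (cs.drop (i + 1 - ps.length)).take ps.length
        = ((cs.drop (i - ps.length + 1)).take (ps.length - 1)) ++ [cs[i]] := by
      have h1 : i + 1 - ps.length = i - ps.length + 1 := by omega
      rw [h1]
      have hs := take_snoc_getElem cs (i - ps.length + 1) ps.length (by omega) hm
      have hidx : (i - ps.length + 1) + (ps.length - 1) = i := by omega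
      simp only [hidx] at hs
      exact hs
    -- the step
    have hstep : stepA cs (ps.length : Int) (PySem.Dict.counter ps) (d, o) (i : Int)
        = (updD d cs[i - ps.length] cs[i],
           if pyDictEq (updD d cs[i - ps.length] cs[i]) (PySem.Dict.counter ps)
           then o + 1 else o) := by
      simp only [stepA, updD, hc, hh]
      rfl
    set t := (cs.drop (i - ps.length + 1)).take (ps.length - 1) with ht
    have hinv' : CInv (updD d cs[i - ps.length] cs[i]) (t ++ [cs[i]]) := by
      apply update_inv
      rw [← hwin]
      exact hinv
    rw [hstep]
    have hnext : CInv (updD d cs[i - ps.length] cs[i])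
        ((cs.drop (i + 1 - ps.length)).take ps.length) := by
      rw [hwin']; exact hinv'
    have hrec := ih (i + 1) (updD d cs[i - ps.length] cs[i])
      (if pyDictEq (updD d cs[i - ps.length] cs[i]) (PySem.Dict.counter ps)
       then o + 1 else o) (by omega) (by omega) hnext
    have hcast1 : ((i + 1 : Nat) : Int) = (i : Int) + 1 := by push_cast; ring
    rw [hcast1] at hrec
    rw [hrec]
    -- the test of this iteration equals B's test of window i - m + 1
    have hEq : pyDictEq (updD d cs[i - ps.length] cs[i]) (PySem.Dict.counter ps)
        = winSortedEq cs (ps.length : Int) (PySem.List.sorted ps (fun x => x) false)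
            ((i - ps.length + 1 : Nat) : Int) := by
      have hiffA := pyDictEq_true_iff _ (PySem.Dict.counter ps) (t ++ [cs[i]]) ps hinv'
        (cinv_counter ps)
      have hiffB := winSortedEq_iff cs ps (i - ps.length + 1)
      have hw2 : (cs.drop (i - ps.length + 1)).take ps.length = t ++ [cs[i]] := by
        rw [show i - ps.length + 1 = i + 1 - ps.length from by omega, hwin']
      rw [hw2] at hiffB
      rw [List.perm_iff_count] at hiffB
      cases hA : pyDictEq (updD d cs[i - ps.length] cs[i]) (PySem.Dict.counter ps) with
      | true =>
        exact (hiffB.mpr (fun a => hiffA.mp hA a)).symm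
      | false =>
        rcases hB : winSortedEq cs (ps.length : Int)
            (PySem.List.sorted ps (fun x => x) false) ((i - ps.length + 1 : Nat) : Int) with _ | _
        · rfl
        · exact absurd (hiffA.mpr (hiffB.mp hB)) (by rw [hA]; simp)
    -- fold the head of B's range in
    have hlt2 : (i : Int) - (ps.length : Int) + 1 < (cs.length : Int) - (ps.length : Int) + 1 := by
      omega
    rw [PySem.List.pyRange_one_cons hlt2, List.countP_cons]
    have hcast2 : ((i - ps.length + 1 : Nat) : Int) = (i : Int) - (ps.length : Int) + 1 := by
      push_cast [Nat.cast_sub hmi]; ring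
    rw [hcast2] at hEq
    have harr : (i : Int) - (ps.length : Int) + 1 + 1 = ((i : Int) + 1) - (ps.length : Int) + 1 := by
      ring
    rw [harr]
    rw [hEq]
    rcases winSortedEq cs (ps.length : Int)
        (PySem.List.sorted ps (fun x => x) false) ((i : Int) - (ps.length : Int) + 1) with _ | _
    · simp
    · simp
      ring

-- ===== VERDICT (by name: the statement is the Claim_ definition above) =====
theorem countPermStr_spec : Claim_equal_countPermStr := by
  unfold Claim_equal_countPermStr
  intro s1 s2 _ hpre
  obtain ⟨h1, h2, hle⟩ := hpre
  unfold Spec_countPermStr countPermStr countPermStr_alt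
  have hg1 : ¬(s1.toList = [] ∨ s2.toList = []) := by tauto
  have hm1 : 1 ≤ s2.toList.length := List.length_pos_iff.mpr h2
  have hg2 : ¬(s2.toList.length > s1.toList.length) := by omega
  have hg2' : ¬((s2.toList.length : Int) > (s1.toList.length : Int)) := by exact_mod_cast hg2
  simp only [if_neg hg1, if_neg hg2, if_neg hg2']
  -- initial counter = counter of the first window
  have hslice : PySem.List.slice s1.toList none (some (s2.toList.length : Int))
      = s1.toList.take s2.toList.length := by
    rw [PySem.List.slice_to s1.toList (by positivity)]
    simp
  rw [hslice]
  have hinv0 : CInv (PySem.Dict.counter (s1.toList.take s2.toList.length))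
      ((s1.toList.drop (s2.toList.length - s2.toList.length)).take s2.toList.length) := by
    simp only [Nat.sub_self, List.drop_zero]
    exact cinv_counter _
  have hloop := loopA s1.toList s2.toList hm1 (s1.toList.length - s2.toList.length)
    s2.toList.length (PySem.Dict.counter (s1.toList.take s2.toList.length))
    (if pyDictEq (PySem.Dict.counter s2.toList)
        (PySem.Dict.counter (s1.toList.take s2.toList.length)) then 1 else 0)
    (by omega) (le_refl _) hinv0
  rw [hloop]
  have hz : (s2.toList.length : Int) - (s2.toList.length : Int) + 1 = 1 := by ring
  rw [hz]
  -- B's range, head split off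
  have h0lt : (0 : Int) < (s1.toList.length : Int) - (s2.toList.length : Int) + 1 := by
    have : (s2.toList.length : Int) ≤ (s1.toList.length : Int) := by exact_mod_cast hle
    omega
  rw [PySem.List.pyRange_one_cons h0lt, List.countP_cons]
  -- the initial test equals B's test of window 0
  have hiffA := pyDictEq_true_iff (PySem.Dict.counter s2.toList)
    (PySem.Dict.counter (s1.toList.take s2.toList.length)) s2.toList
    (s1.toList.take s2.toList.length) (cinv_counter _) (cinv_counter _)
  have hiffB := winSortedEq_iff s1.toList s2.toList 0
  rw [List.drop_zero, List.perm_iff_count] at hiffB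
  have hc0 : ((0 : Nat) : Int) = (0 : Int) := by norm_num
  rw [hc0] at hiffB
  have hEq0 : pyDictEq (PySem.Dict.counter s2.toList)
      (PySem.Dict.counter (s1.toList.take s2.toList.length))
      = winSortedEq s1.toList (s2.toList.length : Int)
          (PySem.List.sorted s2.toList (fun x => x) false) (0 : Int) := by
    cases hA : pyDictEq (PySem.Dict.counter s2.toList)
        (PySem.Dict.counter (s1.toList.take s2.toList.length)) with
    | true =>
      exact (hiffB.mpr (fun a => (hiffA.mp hA a).symm)).symm
    | false =>
      rcases hB : winSortedEq s1.toList (s2.toList.length : Int)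
          (PySem.List.sorted s2.toList (fun x => x) false) (0 : Int) with _ | _
      · rfl
      · exact absurd (hiffA.mpr (fun a => (hiffB.mp hB a).symm)) (by rw [hA]; simp)
  rw [hEq0]
  rcases winSortedEq s1.toList (s2.toList.length : Int)
      (PySem.List.sorted s2.toList (fun x => x) false) (0 : Int) with _ | _
  · simp
  · simp
    ring
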